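-- pv_equiv track=rewrite | github.com/realikechukwu/cardiology-feed | fetch_cardiology_pubmed.py | filter_and_categorize
-- ===== SOURCE A (Python) =====
-- from typing import Any, Dict, List, Optional, Tuple
--
-- def filter_and_categorize(articles: List[Dict[str, Any]], include_no_abstract: bool = False) -> Dict[str, List[Dict[str, Any]]]:
--     """Filter and categorize articles for digest."""
--     categorized = {
--         "priority": [],
--         "standard": [],
--         "needs_review": [],
--         "excluded": []
--     }
--
--     for article in articles:
--         cat = article["category"]
--
--         if cat == "excluded":
--             categorized["excluded"].append(article)
--         elif cat == "priority":
--             categorized["priority"].append(article)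
--         elif cat == "priority_no_abstract":
--             if include_no_abstract:
--                 categorized["needs_review"].append(article)
--             else:
--                 categorized["excluded"].append(article)
--         elif cat == "standard":
--             categorized["standard"].append(article)
--         else:  # low_priority
--             if include_no_abstract:
--                 categorized["needs_review"].append(article)
--             else:
--                 categorized["excluded"].append(article)
--
--     return categorized
-- ===== SOURCE B (Python) =====
-- # B: table-driven — resolve the flag once into a dispatch table, then build each
-- # bucket as a filter over the articles (simpler: no per-item branching).
-- def filter_and_categorize(articles, include_no_abstract=False):
--     review = "needs_review" if include_no_abstract else "excluded"
--     dest = {"excluded": "excluded", "priority": "priority",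
--             "priority_no_abstract": review, "standard": "standard"}
--     return {bucket: [a for a in articles if dest.get(a["category"], review) == bucket]
--             for bucket in ("priority", "standard", "needs_review", "excluded")}
-- ===== Notes on version B (the rewrite author's own statement) =====
-- stated objective: simpler
-- what changed: Replaces the per-article if/elif chain and mutable bucket appends with a flag-resolved dispatch table and a dict comprehension that builds each bucket by filtering, with the low-priority default handled by dict.get.
import Mathlib
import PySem

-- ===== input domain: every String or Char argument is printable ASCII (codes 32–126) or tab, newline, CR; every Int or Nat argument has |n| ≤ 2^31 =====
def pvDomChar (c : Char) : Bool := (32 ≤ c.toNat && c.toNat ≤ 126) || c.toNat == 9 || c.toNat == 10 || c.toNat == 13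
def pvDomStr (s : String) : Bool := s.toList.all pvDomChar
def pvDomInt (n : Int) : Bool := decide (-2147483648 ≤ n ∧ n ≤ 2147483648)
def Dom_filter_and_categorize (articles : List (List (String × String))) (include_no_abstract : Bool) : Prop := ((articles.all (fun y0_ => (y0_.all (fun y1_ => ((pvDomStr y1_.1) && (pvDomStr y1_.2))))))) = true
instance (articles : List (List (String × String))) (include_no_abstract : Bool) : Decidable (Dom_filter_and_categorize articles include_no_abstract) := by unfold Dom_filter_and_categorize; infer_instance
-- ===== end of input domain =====

-- B replaces A's per-article if/elif chain with a flag-resolved dispatch table and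
-- builds each bucket by filtering; equivalence of the return values is proved below.


-- article["category"]: first-match lookup in the association list (none = KeyError, excluded by Pre_)
def pvCatOf (article : List (String × String)) : Option String :=
  (article.find? (fun kv => kv.1 == "category")).map (·.2)

-- ===== PORT A =====
-- the four bucket lists of the dict, in insertion order: priority, standard, needs_review, excluded
def filter_and_categorize (articles : List (List (String × String))) (include_no_abstract : Bool) : List (String × List (List (String × String))) :=
  let st := articles.foldl (fun (st : List (List (String × String)) × List (List (String × String)) × List (List (String × String)) × List (List (String × String))) article =>
    match pvCatOf article with
    | none => st  -- KeyError in Python; outside Pre_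
    | some cat =>
      let (p, s, n, e) := st
      if cat = "excluded" then (p, s, n, e ++ [article])
      else if cat = "priority" then (p ++ [article], s, n, e)
      else if cat = "priority_no_abstract" then
        if include_no_abstract then (p, s, n ++ [article], e) else (p, s, n, e ++ [article])
      else if cat = "standard" then (p, s ++ [article], n, e)
      else  -- low_priority
        if include_no_abstract then (p, s, n ++ [article], e) else (p, s, n, e ++ [article]))
    ([], [], [], [])
  [("priority", st.1), ("standard", st.2.1), ("needs_review", st.2.2.1), ("excluded", st.2.2.2)]

-- ===== PORT B =====
def pvDest (include_no_abstract : Bool) : PySem.Dict String String :=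
  let review := if include_no_abstract then "needs_review" else "excluded"
  PySem.Dict.ofList [("excluded", "excluded"), ("priority", "priority"),
                     ("priority_no_abstract", review), ("standard", "standard")]

-- dest.get(a["category"], review); none when "category" is missing (KeyError in Python, outside Pre_)
def pvBucketOf (include_no_abstract : Bool) (article : List (String × String)) : Option String :=
  (pvCatOf article).map (fun cat =>
    (pvDest include_no_abstract).getD cat (if include_no_abstract then "needs_review" else "excluded"))

def filter_and_categorize_alt (articles : List (List (String × String))) (include_no_abstract : Bool) : List (String × List (List (String × String))) :=
  ["priority", "standard", "needs_review", "excluded"].map (fun bucket =>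
    (bucket, articles.filter (fun a => pvBucketOf include_no_abstract a == some bucket)))

-- ===== PRECONDITION & SPEC =====
-- Pre_ excludes articles without a "category" key, on which Python A raises KeyError.
def Pre_filter_and_categorize (articles : List (List (String × String))) (include_no_abstract : Bool) : Prop :=
  (articles.all (fun a => a.any (fun kv => kv.1 == "category"))) = true
instance (articles : List (List (String × String))) (include_no_abstract : Bool) : Decidable (Pre_filter_and_categorize articles include_no_abstract) := by unfold Pre_filter_and_categorize; infer_instance
def pvWitness_filter_and_categorize : (List (List (String × String))) × Bool :=
  ([[("category", "priority"), ("title", "t")], [("category", "low_priority")]], false)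

def Spec_filter_and_categorize (articles : List (List (String × String))) (include_no_abstract : Bool) (out : List (String × List (List (String × String)))) : Prop := out = filter_and_categorize_alt articles include_no_abstract
instance (articles : List (List (String × String))) (include_no_abstract : Bool) (out : List (String × List (List (String × String)))) : Decidable (Spec_filter_and_categorize articles include_no_abstract out) := by unfold Spec_filter_and_categorize; infer_instance

-- ===== CLAIM (what is proved, stated in full; the proofs are below) =====
def Claim_equal_filter_and_categorize : Prop := ∀ (articles : List (List (String × String))) (include_no_abstract : Bool), Dom_filter_and_categorize articles include_no_abstract → Pre_filter_and_categorize articles include_no_abstract → Spec_filter_and_categorize articles include_no_abstract (filter_and_categorize articles include_no_abstract)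

-- ===== LEMMAS AND PROOFS =====

-- evaluation of the dispatch-table lookup with the low-priority default
set_option maxRecDepth 10000 in
theorem pv_dest_eval (inc : Bool) (cat dflt : String) :
    (pvDest inc).getD cat dflt =
      if cat = "excluded" then "excluded"
      else if cat = "priority" then "priority"
      else if cat = "priority_no_abstract" then (if inc then "needs_review" else "excluded")
      else if cat = "standard" then "standard"
      else dflt := by
  have h : pvDest inc = PySem.Dict.mk [("excluded", "excluded"), ("priority", "priority"),
      ("priority_no_abstract", if inc then "needs_review" else "excluded"), ("standard", "standard")] := by
    cases inc <;> rfl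
  rw [h, PySem.Dict.getD_eq_get?_getD]
  simp only [PySem.Dict.get?_mk_cons]
  by_cases h1 : cat = "excluded"
  · subst h1; rfl
  by_cases h2 : cat = "priority"
  · subst h2; simp
  by_cases h3 : cat = "priority_no_abstract"
  · subst h3; cases inc <;> simp
  by_cases h4 : cat = "standard"
  · subst h4; simp
  have hnone : (PySem.Dict.mk ([] : List (String × String))).get? cat = none := PySem.Dict.get?_empty cat
  simp only [beq_iff_eq, hnone]
  simp [h1, h2, h3, h4, eq_comm]

-- invariant: A's fold from any accumulator appends exactly B's four filters
theorem pv_fold_inv (inc : Bool) (articles : List (List (String × String)))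
    (p s n e : List (List (String × String))) :
    articles.foldl (fun (st : List (List (String × String)) × List (List (String × String)) × List (List (String × String)) × List (List (String × String))) article =>
      match pvCatOf article with
      | none => st
      | some cat =>
        let (p, s, n, e) := st
        if cat = "excluded" then (p, s, n, e ++ [article])
        else if cat = "priority" then (p ++ [article], s, n, e)
        else if cat = "priority_no_abstract" then
          if inc then (p, s, n ++ [article], e) else (p, s, n, e ++ [article])
        else if cat = "standard" then (p, s ++ [article], n, e)
        else
          if inc then (p, s, n ++ [article], e) else (p, s, n, e ++ [article]))
      (p, s, n, e)
    = (p ++ articles.filter (fun a => pvBucketOf inc a == some "priority"),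
       s ++ articles.filter (fun a => pvBucketOf inc a == some "standard"),
       n ++ articles.filter (fun a => pvBucketOf inc a == some "needs_review"),
       e ++ articles.filter (fun a => pvBucketOf inc a == some "excluded")) := by
  induction articles generalizing p s n e with
  | nil => simp
  | cons a rest ih =>
    simp only [List.foldl_cons, List.filter_cons]
    cases hc : pvCatOf a with
    | none =>
      simp only [hc]
      rw [ih]
      simp [pvBucketOf, hc]
    | some cat =>
      simp only [hc]
      by_cases h1 : cat = "excluded"
      · rw [if_pos h1, ih]; subst h1
        simp [pvBucketOf, hc, pv_dest_eval]
      by_cases h2 : cat = "priority"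
      · rw [if_neg h1, if_pos h2, ih]; subst h2
        simp [pvBucketOf, hc, pv_dest_eval]
      by_cases h3 : cat = "priority_no_abstract"
      · rw [if_neg h1, if_neg h2, if_pos h3]; subst h3
        cases inc <;> (simp only [Bool.false_eq_true, ↓reduceIte] at ih ⊢; rw [ih]; simp [pvBucketOf, hc, pv_dest_eval])
      by_cases h4 : cat = "standard"
      · rw [if_neg h1, if_neg h2, if_neg h3, if_pos h4, ih]; subst h4
        simp [pvBucketOf, hc, pv_dest_eval]
      · rw [if_neg h1, if_neg h2, if_neg h3, if_neg h4]
        cases inc <;> (simp only [Bool.false_eq_true, ↓reduceIte] at ih ⊢; rw [ih]; simp [pvBucketOf, hc, pv_dest_eval, h1, h2, h3, h4])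

-- ===== VERDICT (by name: the statement is the Claim_ definition above) =====
theorem filter_and_categorize_spec : Claim_equal_filter_and_categorize := by
  intro articles inc _ _
  unfold Spec_filter_and_categorize filter_and_categorize filter_and_categorize_alt
  rw [pv_fold_inv]
  simp
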